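-- pv_equiv track=rewrite | github.com/mhiloca/Codewars | squares_into_squares.py | decompose_v2
-- ===== SOURCE A (Python) =====
-- def decompose_v2(n):
--     square, result = 0, [n]
--     while result:
--         current = result.pop()
--         square += current ** 2
--         for i in range(current - 1, 0, -1):
--             if square - (i ** 2) >= 0:
--                 square -= i ** 2
--                 result.append(i)
--                 if square == 0:
--                     return sorted(result)
--     return None
-- ===== SOURCE B (Python) =====
-- def decompose_v2(n):
--     def rec(rem, hi):
--         for i in range(hi - 1, 0, -1):
--             sq = i * i
--             if sq <= rem:
--                 if sq == rem:
--                     return [i]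
--                 sub = rec(rem - sq, i)
--                 if sub is not None:
--                     return [i] + sub
--         return None
--     res = rec(n * n, n)
--     return sorted(res) if res is not None else None
-- ===== Notes on version B (the rewrite author's own statement) =====
-- stated objective: simpler
-- what changed: Replaces A's explicit result-stack with mutable square bookkeeping and pop-to-backtrack while-loop by a direct recursive largest-first scan rec(rem, hi) that returns the chosen roots, sorting once at the end.
import Mathlib
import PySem

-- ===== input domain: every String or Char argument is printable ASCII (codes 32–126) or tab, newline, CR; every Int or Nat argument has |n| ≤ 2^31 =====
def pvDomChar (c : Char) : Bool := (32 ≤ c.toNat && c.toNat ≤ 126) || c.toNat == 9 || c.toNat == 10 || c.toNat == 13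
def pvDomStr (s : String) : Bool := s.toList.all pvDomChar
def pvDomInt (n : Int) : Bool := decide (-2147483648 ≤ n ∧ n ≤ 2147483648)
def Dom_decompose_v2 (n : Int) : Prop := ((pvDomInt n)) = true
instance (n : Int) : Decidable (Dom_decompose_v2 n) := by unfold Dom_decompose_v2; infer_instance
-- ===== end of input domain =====

-- B replaces A's explicit result-stack with pop-to-backtrack while loop by a direct
-- recursive largest-first scan (same search, plainer decomposition); same cost, same values.

-- ===== PORT A =====
-- the inner 'for i in range(current-1, 0, -1)' loop; i counts the loop variable down.
-- inl = early 'return sorted(result)'; inr = state (square, result) at loop end.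
def innerA (square : Int) (result : List Int) : Nat → (List Int ⊕ (Int × List Int))
  | 0 => .inr (square, result)
  | (i+1) =>
    let iv : Int := (i : Int) + 1
    if square - iv ^ 2 ≥ 0 then
      if square - iv ^ 2 = 0 then
        .inl (PySem.List.sorted (result ++ [iv]) (fun x => x) false)
      else innerA (square - iv ^ 2) (result ++ [iv]) i
    else innerA square result i

-- potential of the stack; each iteration of A's 'while result:' loop strictly decreases it
-- (lemma loopAF_dec below), so phiA result + 1 fuel makes the fuel guard unreachable
def phiA (result : List Int) : Nat := (result.map (fun e => 2 ^ e.toNat)).sum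

-- the 'while result:' loop of A, fuel-guarded (fuel is only a totality guard: the fuel-0
-- branch is never reached from decompose_v2's initial fuel, see loopAF_enough below)
def loopAF : Nat → Int → List Int → Option (List Int)
  | 0, _, _ => none
  | (f+1), square, result =>
    if h : result = [] then none
    else
      match innerA (square + (result.getLast h) ^ 2) result.dropLast
          (((result.getLast h) - 1).toNat) with
      | .inl out => some out
      | .inr (sq', r') => loopAF f sq' r'

def decompose_v2 (n : Int) : Option (List Int) := loopAF (phiA [n] + 1) 0 [n]

-- ===== PORT B =====
-- rec's 'for i in range(hi-1, 0, -1)' scan; scanB rem i = scan starting at loop value i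
def scanB (rem : Int) : Nat → Option (List Int)
  | 0 => none
  | (i+1) =>
    let iv : Int := (i : Int) + 1
    let sq := iv * iv
    if sq ≤ rem then
      if sq = rem then some [iv]
      else
        match scanB (rem - sq) i with
        | some sub => some (iv :: sub)
        | none => scanB rem i
    else scanB rem i

def decompose_v2_alt (n : Int) : Option (List Int) :=
  match scanB (n * n) ((n - 1).toNat) with
  | some res => some (PySem.List.sorted res (fun x => x) false)
  | none => none

-- ===== PRECONDITION & SPEC =====
def Spec_decompose_v2 (n : Int) (out : Option (List Int)) : Prop := out = decompose_v2_alt n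
instance (n : Int) (out : Option (List Int)) : Decidable (Spec_decompose_v2 n out) := by unfold Spec_decompose_v2; infer_instance

-- ===== CLAIM (what is proved, stated in full; the proofs are below) =====
def Claim_equal_decompose_v2 : Prop := ∀ (n : Int), Dom_decompose_v2 n → Spec_decompose_v2 n (decompose_v2 n)

-- ===== LEMMAS AND PROOFS =====

theorem phiA_append (r : List Int) (c : Int) : phiA (r ++ [c]) = phiA r + 2 ^ c.toNat := by
  simp [phiA]

-- innerA only appends loop values ≤ i, so the potential grows by less than 2^(i+1)
theorem innerA_inr_phi : ∀ (i : Nat) (sq : Int) (r : List Int) (sq' : Int) (r' : List Int),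
    innerA sq r i = .inr (sq', r') → ∃ S : Nat, phiA r' = phiA r + S ∧ S + 2 ≤ 2 ^ (i + 1) := by
  intro i
  induction i with
  | zero =>
    intro sq r sq' r' h
    simp [innerA] at h
    exact ⟨0, by simp [h.2], by norm_num⟩
  | succ i ih =>
    intro sq r sq' r' h
    simp only [innerA] at h
    split_ifs at h with h1 h2
    · obtain ⟨S, hS1, hS2⟩ := ih _ _ _ _ h
      refine ⟨2 ^ (i + 1) + S, ?_, ?_⟩
      · rw [hS1, phiA_append]
        have : ((i : Int) + 1).toNat = i + 1 := by omega
        rw [this]; ring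
      · have : 2 ^ (i + 1) + 2 ^ (i + 1) = 2 ^ (i + 1 + 1) := by ring
        omega
    · obtain ⟨S, hS1, hS2⟩ := ih _ _ _ _ h
      refine ⟨S, hS1, ?_⟩
      have : (2:Nat) ^ (i + 1) ≤ 2 ^ (i + 1 + 1) := Nat.pow_le_pow_right (by norm_num) (by omega)
      omega

-- one iteration of the while loop strictly decreases the potential
theorem loopAF_dec (square : Int) (result : List Int) (h : ¬ result = [])
    (sq' : Int) (r' : List Int)
    (hin : innerA (square + (result.getLast h) ^ 2) result.dropLast
        (((result.getLast h) - 1).toNat) = .inr (sq', r')) :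
    phiA r' < phiA result := by
  set cur := result.getLast h with hcur
  obtain ⟨S, hS1, hS2⟩ := innerA_inr_phi _ _ _ _ _ hin
  have hsplit : result = result.dropLast ++ [cur] := (List.dropLast_append_getLast h).symm
  have hphi : phiA result = phiA result.dropLast + 2 ^ cur.toNat := by
    conv_lhs => rw [hsplit]
    exact phiA_append _ _
  rw [hphi, hS1]
  have : S < 2 ^ cur.toNat := by
    by_cases hc : 1 ≤ cur
    · have h1 : (cur - 1).toNat + 1 = cur.toNat := by omega
      rw [h1] at hS2
      omega
    · have h0 : cur.toNat = 0 := by omega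
      have h1 : (cur - 1).toNat = 0 := by omega
      rw [h1] at hS2
      rw [h0]
      omega
  omega

-- any fuel above the potential computes the same value (the fuel guard is unreachable)
theorem loopAF_enough : ∀ (f₁ : Nat) (f₂ : Nat) (sq : Int) (r : List Int),
    phiA r < f₁ → phiA r < f₂ → loopAF f₁ sq r = loopAF f₂ sq r := by
  intro f₁
  induction f₁ with
  | zero => intro f₂ sq r h1; omega
  | succ g₁ ih =>
    intro f₂ sq r h1 h2
    cases f₂ with
    | zero => omega
    | succ g₂ =>
      rw [loopAF, loopAF]
      by_cases hr : r = []
      · rw [dif_pos hr, dif_pos hr]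
      · rw [dif_neg hr, dif_neg hr]
        split
        · rfl
        · rename_i sq' r' heq
          have hlt := loopAF_dec sq r hr sq' r' heq
          exact ih g₂ sq' r' (by omega) (by omega)

-- "scanning from loop value i with remaining square rem, stack r, and fuel f left" in A
def stepScanF (f : Nat) (rem : Int) (r : List Int) (i : Nat) : Option (List Int) :=
  match innerA rem r i with
  | .inl out => some out
  | .inr (sq', r') => loopAF f sq' r'

theorem loopAF_cons (f : Nat) (square : Int) (r : List Int) (c : Int) :
    loopAF (f + 1) square (r ++ [c]) = stepScanF f (square + c ^ 2) r ((c - 1).toNat) := by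
  have hne : ¬ (r ++ [c] = []) := by simp
  have h1 : (r ++ [c]).getLast hne = c := by simp
  have h2 : (r ++ [c]).dropLast = r := by simp
  rw [loopAF, dif_neg hne]
  split
  · rename_i out heq
    rw [h1, h2] at heq
    rw [stepScanF, heq]
  · rename_i sq' r' heq
    rw [h1, h2] at heq
    rw [stepScanF, heq]

-- the key simulation: A's scan-with-stack equals B's recursive scan, with failure
-- continuing as A's backtracking loop on the stack below
theorem stepScanF_eq : ∀ (i : Nat) (f : Nat) (rem : Int) (r : List Int),
    phiA r + 2 ^ (i + 1) ≤ f + 1 →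
    stepScanF f rem r i = match scanB rem i with
      | some l => some (PySem.List.sorted (r ++ l) (fun x => x) false)
      | none => loopAF (phiA r + 1) rem r := by
  intro i
  induction i with
  | zero =>
    intro f rem r hf
    have h2 : (2:Nat) ^ (0 + 1) = 2 := by norm_num
    rw [h2] at hf
    simp only [stepScanF, innerA, scanB]
    exact loopAF_enough f (phiA r + 1) rem r (by omega) (by omega)
  | succ i ih =>
    intro f rem r hf
    have hpow : (2:Nat) ^ (i + 1) + 2 ^ (i + 1) = 2 ^ (i + 1 + 1) := by ring
    unfold stepScanF innerA scanB
    by_cases h1 : rem - ((i : Int) + 1) ^ 2 ≥ 0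
    · rw [if_pos h1]
      by_cases h2 : rem - ((i : Int) + 1) ^ 2 = 0
      · rw [if_pos h2]
        have heq : ((i : Int) + 1) * ((i : Int) + 1) = rem := by nlinarith
        simp [heq]
      · rw [if_neg h2]
        have hlt : ((i : Int) + 1) * ((i : Int) + 1) ≤ rem := by nlinarith
        have hne : ¬ ((i : Int) + 1) * ((i : Int) + 1) = rem := by
          intro hc; apply h2; nlinarith
        rw [if_pos hlt, if_neg hne]
        have lhs_eq : (match innerA (rem - ((i : Int) + 1) ^ 2) (r ++ [(i : Int) + 1]) i with
              | .inl out => some out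
              | .inr (sq', r') => loopAF f sq' r') =
            stepScanF f (rem - ((i : Int) + 1) ^ 2) (r ++ [(i : Int) + 1]) i := rfl
        have hphi : phiA (r ++ [(i : Int) + 1]) = phiA r + 2 ^ (i + 1) := by
          rw [phiA_append]
          have : ((i : Int) + 1).toNat = i + 1 := by omega
          rw [this]
        rw [lhs_eq, ih f _ _ (by rw [hphi]; omega)]
        have hmul : rem - ((i : Int) + 1) * ((i : Int) + 1) = rem - ((i : Int) + 1) ^ 2 := by ring_nf
        rw [hmul]
        cases hsub : scanB (rem - ((i : Int) + 1) ^ 2) i with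
        | some sub => simp
        | none =>
          simp only
          have hback : loopAF (phiA (r ++ [(i : Int) + 1]) + 1)
                (rem - ((i : Int) + 1) ^ 2) (r ++ [(i : Int) + 1]) =
              stepScanF (phiA (r ++ [(i : Int) + 1])) rem r i := by
            rw [loopAF_cons]
            have e1 : rem - ((i : Int) + 1) ^ 2 + ((i : Int) + 1) ^ 2 = rem := by ring
            have e2 : ((i : Int) + 1 - 1).toNat = i := by omega
            rw [e1, e2]
          rw [hback, ih _ _ _ (by rw [hphi]; omega)]
    · rw [if_neg h1]
      have hgt : ¬ ((i : Int) + 1) * ((i : Int) + 1) ≤ rem := by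
        intro hc; apply h1; nlinarith
      rw [if_neg hgt]
      have hmono : (2:Nat) ^ (i + 1) ≤ 2 ^ (i + 1 + 1) := Nat.pow_le_pow_right (by norm_num) (by omega)
      exact ih f rem r (by omega)

-- ===== VERDICT (by name: the statement is the Claim_ definition above) =====
theorem decompose_v2_spec : Claim_equal_decompose_v2 := by
  intro n _
  unfold Spec_decompose_v2 decompose_v2 decompose_v2_alt
  have h0 : loopAF (phiA [n] + 1) 0 [n] = stepScanF (phiA [n]) (0 + n ^ 2) [] ((n - 1).toNat) := by
    have : ([] : List Int) ++ [n] = [n] := rfl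
    rw [← this, loopAF_cons]
  have hphin : phiA [n] = 2 ^ n.toNat := by simp [phiA]
  have hfuel : phiA ([] : List Int) + 2 ^ ((n - 1).toNat + 1) ≤ phiA [n] + 1 := by
    have hnil : phiA ([] : List Int) = 0 := by simp [phiA]
    rw [hnil, hphin]
    by_cases hn : 1 ≤ n
    · have : (n - 1).toNat + 1 = n.toNat := by omega
      rw [this]
      omega
    · have e1 : (n - 1).toNat = 0 := by omega
      have e2 : n.toNat = 0 := by omega
      rw [e1, e2]
      norm_num
  rw [h0, stepScanF_eq _ _ _ _ hfuel]
  have hnn : 0 + n ^ 2 = n * n := by ring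
  rw [hnn]
  cases h : scanB (n * n) ((n - 1).toNat) with
  | some l => simp
  | none =>
    simp only
    rw [loopAF]
    simp
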